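-- pv_equiv track=rewrite | github.com/bowen-zhang/onelog | importer.py | normalize_aircraft_model_code
-- ===== SOURCE A (Python) =====
-- def normalize_aircraft_model_code(code):
-- 	id = 0
-- 	for ch in code:
-- 		if ch >= '0' and ch <= '9':
-- 			id += id * 36 + (ord(ch) - ord('0'))
-- 		elif ch >= 'A' and ch <= 'Z':
-- 			id += id * 36 + (ord(ch) - ord('A') + 10)
-- 		else:
-- 			raise Exception('invalid code: %s' % (code))
-- 	return id
-- ===== SOURCE B (Python) =====
-- def normalize_aircraft_model_code(code):
--     values = []
--     for ch in code:
--         if '0' <= ch <= '9':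
--             values.append(ord(ch) - ord('0'))
--         elif 'A' <= ch <= 'Z':
--             values.append(ord(ch) - ord('A') + 10)
--         else:
--             raise Exception('invalid code: %s' % (code))
--     n = len(values)
--     return sum(v * 37 ** (n - 1 - i) for i, v in enumerate(values))
-- ===== Notes on version B (the rewrite author's own statement) =====
-- stated objective: alternative
-- what changed: Replaced the single running-accumulator Horner fold (id = id*37 + v, written as id += id*36 + v) by a two-pass shape: first map characters to digit values, then sum v * 37**(n-1-i) as an explicit positional polynomial.
import Mathlib
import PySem

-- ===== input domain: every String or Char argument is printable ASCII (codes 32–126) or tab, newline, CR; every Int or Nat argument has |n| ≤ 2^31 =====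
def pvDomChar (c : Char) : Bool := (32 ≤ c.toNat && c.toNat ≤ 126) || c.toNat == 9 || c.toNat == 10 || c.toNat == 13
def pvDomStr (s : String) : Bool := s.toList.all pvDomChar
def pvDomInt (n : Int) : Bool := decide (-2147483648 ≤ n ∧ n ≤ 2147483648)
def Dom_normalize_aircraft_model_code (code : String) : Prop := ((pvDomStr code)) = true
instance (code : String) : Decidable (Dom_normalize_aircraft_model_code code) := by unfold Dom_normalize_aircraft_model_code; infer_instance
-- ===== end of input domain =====

-- B replaces A's single running Horner accumulator by a map-to-digit-values pass followed by an
-- explicit positional polynomial sum (alternative decomposition, same cost).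

-- ===== PORT A =====
-- A's loop: id accumulator, raise (none) on an invalid character.
def pvALoop : List Char → Int → Option Int
  | [], id => some id
  | ch :: rest, id =>
    if '0' ≤ ch ∧ ch ≤ '9' then
      pvALoop rest (id + id * 36 + ((ch.toNat : Int) - ('0'.toNat : Int)))
    else if 'A' ≤ ch ∧ ch ≤ 'Z' then
      pvALoop rest (id + id * 36 + ((ch.toNat : Int) - ('A'.toNat : Int) + 10))
    else none

def normalize_aircraft_model_code (code : String) : Int :=
  (pvALoop code.toList 0).getD 0

-- ===== PORT B =====
-- B's first pass: build the list of digit values, none on an invalid character (the raise).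
def pvBVals : List Char → Option (List Int)
  | [] => some []
  | ch :: rest =>
    if '0' ≤ ch ∧ ch ≤ '9' then
      (pvBVals rest).map (fun vs => ((ch.toNat : Int) - ('0'.toNat : Int)) :: vs)
    else if 'A' ≤ ch ∧ ch ≤ 'Z' then
      (pvBVals rest).map (fun vs => ((ch.toNat : Int) - ('A'.toNat : Int) + 10) :: vs)
    else none

def normalize_aircraft_model_code_alt (code : String) : Int :=
  match pvBVals code.toList with
  | none => 0
  | some values =>
    let n := values.length
    ((values.zipIdx.map (fun p => p.1 * (37 : Int) ^ (n - 1 - p.2))).sum)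

-- ===== PRECONDITION & SPEC =====
-- Pre_ excludes exactly the codes containing a character outside 0-9/A-Z, on which A raises Exception.
def Pre_normalize_aircraft_model_code (code : String) : Prop :=
  (code.toList.all fun ch =>
    (decide ('0' ≤ ch) && decide (ch ≤ '9')) || (decide ('A' ≤ ch) && decide (ch ≤ 'Z'))) = true
instance (code : String) : Decidable (Pre_normalize_aircraft_model_code code) := by
  unfold Pre_normalize_aircraft_model_code; infer_instance

def pvWitness_normalize_aircraft_model_code : String := "B7"

def Spec_normalize_aircraft_model_code (code : String) (out : Int) : Prop := out = normalize_aircraft_model_code_alt code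
instance (code : String) (out : Int) : Decidable (Spec_normalize_aircraft_model_code code out) := by unfold Spec_normalize_aircraft_model_code; infer_instance

-- ===== CLAIM (what is proved, stated in full; the proofs are below) =====
def Claim_equal_normalize_aircraft_model_code : Prop := ∀ (code : String), Dom_normalize_aircraft_model_code code → Pre_normalize_aircraft_model_code code → Spec_normalize_aircraft_model_code code (normalize_aircraft_model_code code)

-- ===== LEMMAS AND PROOFS =====

-- digit value of a valid character
def pvDv (ch : Char) : Int :=
  if '0' ≤ ch ∧ ch ≤ '9' then (ch.toNat : Int) - ('0'.toNat : Int)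
  else (ch.toNat : Int) - ('A'.toNat : Int) + 10


lemma pvDv_digit {ch : Char} (h : '0' ≤ ch ∧ ch ≤ '9') :
    pvDv ch = (ch.toNat : Int) - ('0'.toNat : Int) := if_pos h

lemma pvDv_alpha {ch : Char} (h : ¬('0' ≤ ch ∧ ch ≤ '9')) :
    pvDv ch = (ch.toNat : Int) - ('A'.toNat : Int) + 10 := if_neg h

-- positional polynomial with leading exponent e
def pvHpow : List Int → Nat → Int
  | [], _ => 0
  | v :: t, e => v * (37 : Int) ^ e + pvHpow t (e - 1)

lemma pvBVals_valid (l : List Char)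
    (h : ∀ ch ∈ l, ('0' ≤ ch ∧ ch ≤ '9') ∨ ('A' ≤ ch ∧ ch ≤ 'Z')) :
    pvBVals l = some (l.map pvDv) := by
  induction l with
  | nil => rfl
  | cons ch t ih =>
    have hch := h ch (List.mem_cons_self ..)
    have ht := ih (fun c hc => h c (List.mem_cons_of_mem _ hc))
    rcases hch with h1 | h2
    · simp [pvBVals, h1, ht, pvDv]
    · rcases Decidable.em ('0' ≤ ch ∧ ch ≤ '9') with h1 | h1
      · simp [pvBVals, h1, ht, pvDv]
      · simp [pvBVals, h1, h2, ht, pvDv]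

lemma pvZipIdx_sum (vs : List Int) :
    ∀ (k L : Nat),
      ((vs.zipIdx k).map (fun p => p.1 * (37 : Int) ^ (L - 1 - p.2))).sum
        = pvHpow vs (L - 1 - k) := by
  induction vs with
  | nil => intro k L; rfl
  | cons v t ih =>
    intro k L
    have : L - 1 - (k + 1) = (L - 1 - k) - 1 := by omega
    simp [List.zipIdx_cons, pvHpow, ih (k + 1) L, this]

lemma pvALoop_valid (l : List Char)
    (h : ∀ ch ∈ l, ('0' ≤ ch ∧ ch ≤ '9') ∨ ('A' ≤ ch ∧ ch ≤ 'Z')) :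
    ∀ id : Int,
      pvALoop l id = some (id * (37 : Int) ^ l.length + pvHpow (l.map pvDv) (l.length - 1)) := by
  induction l with
  | nil => intro id; simp [pvALoop, pvHpow]
  | cons ch t ih =>
    intro id
    have hch := h ch (List.mem_cons_self ..)
    have ht := ih (fun c hc => h c (List.mem_cons_of_mem _ hc))
    have hpow : (37 : Int) ^ (t.length + 1) = (37 : Int) ^ t.length * 37 := pow_succ 37 t.length
    rcases hch with h1 | h2
    · rw [show pvALoop (ch :: t) id
            = pvALoop t (id + id * 36 + ((ch.toNat : Int) - ('0'.toNat : Int))) by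
          simp [pvALoop, h1]]
      rw [ht]
      simp only [List.length_cons, List.map_cons, pvHpow, pvDv_digit h1, Nat.add_sub_cancel]
      rw [hpow]; ring_nf
    · rcases Decidable.em ('0' ≤ ch ∧ ch ≤ '9') with h1 | h1
      · rw [show pvALoop (ch :: t) id
              = pvALoop t (id + id * 36 + ((ch.toNat : Int) - ('0'.toNat : Int))) by
            simp [pvALoop, h1]]
        rw [ht]
        simp only [List.length_cons, List.map_cons, pvHpow, pvDv_digit h1, Nat.add_sub_cancel]
        rw [hpow]; ring_nf
      · rw [show pvALoop (ch :: t) id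
              = pvALoop t (id + id * 36 + ((ch.toNat : Int) - ('A'.toNat : Int) + 10)) by
            simp [pvALoop, h1, h2]]
        rw [ht]
        simp only [List.length_cons, List.map_cons, pvHpow, pvDv_alpha h1, Nat.add_sub_cancel]
        rw [hpow]; ring_nf

-- ===== VERDICT (by name: the statement is the Claim_ definition above) =====
theorem normalize_aircraft_model_code_spec : Claim_equal_normalize_aircraft_model_code := by
  intro code _ hpre0
  have hpre : ∀ ch ∈ code.toList, ('0' ≤ ch ∧ ch ≤ '9') ∨ ('A' ≤ ch ∧ ch ≤ 'Z') := by
    intro ch hch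
    have := List.all_eq_true.mp hpre0 ch hch
    simpa using this
  unfold Spec_normalize_aircraft_model_code
  unfold normalize_aircraft_model_code normalize_aircraft_model_code_alt
  rw [pvALoop_valid code.toList hpre 0, pvBVals_valid code.toList hpre]
  simp only [Option.getD_some]
  rw [pvZipIdx_sum (code.toList.map pvDv) 0 (code.toList.map pvDv).length]
  simp
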